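-- pv_equiv track=rewrite | github.com/emabutuza/uni-work | semester1/FP/FP-retake_year/a4-emabutuza-2/backtracking13_iterative.py | find_all_mountain_subsets_iterative
-- ===== SOURCE A (Python) =====
-- def is_mountain(subset):
--     if len(subset) < 3:
--         return False
--
--     peak_found = False
--     for index in range(1, len(subset) - 1):
--         if subset[index] > subset[index - 1] and subset[index] > subset[index + 1]:
--             peak_found = True
--             for before_peak in range(1, index):
--                 if subset[before_peak] <= subset[before_peak - 1]:
--                     return False
--             for after_peak in range(index + 1, len(subset)):
--                 if subset[after_peak] >= subset[after_peak - 1]: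
--                     return False
--             return True
--     return False
--
-- def find_all_mountain_subsets_iterative(given_sequence):
--     result = []
--     stack = [(0, [])]
--
--     while stack:
--         start, path = stack.pop()
--         if is_mountain(path):
--             result.append(path[:])
--         for i in range(start, len(given_sequence)):
--             stack.append((i + 1, path + [given_sequence[i]]))
--
--     return result
-- ===== SOURCE B (Python) =====
-- def is_mountain(subset):
--     if len(subset) < 3:
--         return False
--
--     peak_found = False
--     for index in range(1, len(subset) - 1):
--         if subset[index] > subset[index - 1] and subset[index] > subset[index + 1]:
--             peak_found = True
--             for before_peak in range(1, index):
--                 if subset[before_peak] <= subset[before_peak - 1]: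
--                     return False
--             for after_peak in range(index + 1, len(subset)):
--                 if subset[after_peak] >= subset[after_peak - 1]:
--                     return False
--             return True
--     return False
--
-- def find_all_mountain_subsets_iterative(given_sequence):
--     n = len(given_sequence)
--
--     def rec(start, path):
--         out = [path[:]] if is_mountain(path) else []
--         # iterate downwards: the deepest-pushed branch is explored first (DFS order)
--         for i in range(n - 1, start - 1, -1):
--             out += rec(i + 1, path + [given_sequence[i]])
--         return out
--
--     return rec(0, [])
-- ===== Notes on version B (the rewrite author's own statement) =====
-- stated objective: alternative
-- what changed: Replaced A's explicit worklist (a LIFO stack of (start, path) pairs driven by a while loop) with a direct recursive DFS helper rec(start, path) that returns its subtree's results; iterating extensions in decreasing index order reproduces the stack's pop order exactly.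
import Mathlib
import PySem

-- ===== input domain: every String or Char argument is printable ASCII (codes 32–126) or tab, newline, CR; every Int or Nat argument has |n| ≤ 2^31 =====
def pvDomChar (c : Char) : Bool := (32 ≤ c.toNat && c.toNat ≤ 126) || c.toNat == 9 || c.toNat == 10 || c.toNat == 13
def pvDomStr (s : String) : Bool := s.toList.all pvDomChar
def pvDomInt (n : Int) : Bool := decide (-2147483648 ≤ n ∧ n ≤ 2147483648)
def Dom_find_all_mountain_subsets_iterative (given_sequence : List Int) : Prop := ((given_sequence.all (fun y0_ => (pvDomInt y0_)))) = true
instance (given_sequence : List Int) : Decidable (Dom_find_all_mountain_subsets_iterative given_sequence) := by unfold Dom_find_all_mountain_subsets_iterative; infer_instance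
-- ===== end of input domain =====

-- B replaces the explicit LIFO worklist by a recursive DFS helper (same output, same order); objective: alternative decomposition.

-- ===== PORT A =====
-- is_mountain is textually identical in A and in B, so it is ported once and shared.
-- All list indices produced by the Python loops are in range, so getD is exact here.
def imCheckBefore (s : List Int) (index : Nat) : Bool :=
  (List.range' 1 (index - 1)).all (fun bp => !(s.getD bp 0 ≤ s.getD (bp - 1) 0))

def imCheckAfter (s : List Int) (index : Nat) : Bool :=
  (List.range' (index + 1) (s.length - (index + 1))).all
    (fun ap => !(s.getD ap 0 ≥ s.getD (ap - 1) 0))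

-- the outer 'for index' loop with its early returns
def imOuter (s : List Int) : List Nat → Bool
  | [] => false
  | index :: rest =>
      if s.getD index 0 > s.getD (index - 1) 0 ∧ s.getD index 0 > s.getD (index + 1) 0 then
        imCheckBefore s index && imCheckAfter s index
      else imOuter s rest

def isMountain (s : List Int) : Bool :=
  if s.length < 3 then false
  else imOuter s (List.range' 1 (s.length - 2))

-- weight of one stack entry / of the whole stack (termination measure for A's while loop)
def pvW (n : Nat) (e : Nat × List Int) : Nat := 3 ^ (n - e.1)
def pvMu (n : Nat) (st : List (Nat × List Int)) : Nat := (st.map (pvW n)).sum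

theorem pvSumPow (m k : Nat) :
    ((List.range' k m).map (fun i => 3 ^ (k + m - (i + 1)))).sum < 3 ^ m := by
  induction m generalizing k with
  | zero => simp
  | succ m ih =>
      rw [List.range'_succ]
      simp only [List.map_cons, List.sum_cons]
      have h1 : k + (m + 1) - (k + 1) = m := by omega
      have h2 : k + (m + 1) = (k + 1) + m := by omega
      rw [h1, h2]
      have := ih (k + 1)
      have h3 : (3:Nat) ^ m + 3 ^ m ≤ 3 ^ (m + 1) := by
        rw [pow_succ]; omega
      omega

theorem pvPush_lt (n start : Nat) (path : List Int) (f : Nat → List Int) :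
    pvMu n (((List.range' start (n - start)).map (fun i => (i + 1, f i))).reverse)
      < pvW n (start, path) := by
  rcases Nat.lt_or_ge start n with h | h
  · have hm : n = start + (n - start) := by omega
    have key := pvSumPow (n - start) start
    rw [← hm] at key
    simpa [pvMu, pvW, Function.comp, List.sum_reverse] using key
  · have : n - start = 0 := by omega
    simp [this, pvMu, pvW]

def loopA (seq : List Int) : List (Nat × List Int) → List (List Int) → List (List Int)
  | [], result => result
  | (start, path) :: rest, result =>
      loopA seq
        (((List.range' start (seq.length - start)).map
            (fun i => (i + 1, path ++ [seq.getD i 0]))).reverse ++ rest)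
        (if isMountain path then result ++ [path] else result)
  termination_by st _ => pvMu seq.length st
  decreasing_by
    have h := pvPush_lt seq.length start path (fun i => path ++ [seq.getD i 0])
    simp only [pvMu, pvW, List.map_append, List.sum_append, List.map_cons, List.sum_cons] at *
    omega

def find_all_mountain_subsets_iterative (given_sequence : List Int) : List (List Int) :=
  loopA given_sequence [(0, [])] []

-- ===== PORT B =====
-- recursive DFS: emit path if it is a mountain, then extend with indices i = n-1 down to start
def recB (seq : List Int) (start : Nat) (path : List Int) : List (List Int) :=
  (if isMountain path then [path] else []) ++
    ((List.range' start (seq.length - start)).reverse.attach.flatMap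
      (fun i => recB seq (i.1 + 1) (path ++ [seq.getD i.1 0])))
  termination_by seq.length - start
  decreasing_by
    have hi := i.2
    simp only [List.mem_reverse, List.mem_range'] at hi
    omega

def find_all_mountain_subsets_iterative_alt (given_sequence : List Int) : List (List Int) :=
  recB given_sequence 0 []

-- ===== PRECONDITION & SPEC =====
def Spec_find_all_mountain_subsets_iterative (given_sequence : List Int) (out : List (List Int)) : Prop := out = find_all_mountain_subsets_iterative_alt given_sequence
instance (given_sequence : List Int) (out : List (List Int)) : Decidable (Spec_find_all_mountain_subsets_iterative given_sequence out) := by unfold Spec_find_all_mountain_subsets_iterative; infer_instance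

-- ===== CLAIM (what is proved, stated in full; the proofs are below) =====
def Claim_equal_find_all_mountain_subsets_iterative : Prop := ∀ (given_sequence : List Int), Dom_find_all_mountain_subsets_iterative given_sequence → Spec_find_all_mountain_subsets_iterative given_sequence (find_all_mountain_subsets_iterative given_sequence)

-- ===== LEMMAS AND PROOFS =====
theorem pvFlatMap_attach {α β : Type} (l : List α) (f : α → List β) :
    l.attach.flatMap (fun i => f i.1) = l.flatMap f := by
  conv_rhs => rw [← List.attach_map_subtype_val l]
  rw [List.flatMap_map]


theorem recB_eq (seq : List Int) (start : Nat) (path : List Int) :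
    recB seq start path = (if isMountain path then [path] else []) ++
      ((List.range' start (seq.length - start)).reverse.flatMap
        (fun i => recB seq (i + 1) (path ++ [seq.getD i 0]))) := by
  rw [recB.eq_def]
  congr 1
  exact pvFlatMap_attach ((List.range' start (seq.length - start)).reverse)
    (fun i => recB seq (i + 1) (path ++ [seq.getD i 0]))

theorem loopA_eq_recB (seq : List Int) (stack : List (Nat × List Int)) (result : List (List Int)) :
    loopA seq stack result = result ++ stack.flatMap (fun e => recB seq e.1 e.2) := by
  induction stack, result using loopA.induct seq with
  | case1 result => simp [loopA]
  | case2 start path rest result =>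
      rename_i ih
      simp only [dite_eq_ite] at ih
      rw [loopA]
      rw [ih, List.flatMap_cons, recB_eq]
      split <;>
        · simp [List.flatMap_append, List.append_assoc]
          rw [← List.map_reverse, List.flatMap_map]

-- ===== VERDICT (by name: the statement is the Claim_ definition above) =====
theorem find_all_mountain_subsets_iterative_spec : Claim_equal_find_all_mountain_subsets_iterative := by
  intro seq _
  unfold Spec_find_all_mountain_subsets_iterative find_all_mountain_subsets_iterative
    find_all_mountain_subsets_iterative_alt
  rw [loopA_eq_recB]
  simp
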